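-- pv_equiv track=rewrite | github.com/christianbitter/phd_common | nlp.py | build_previous_wordcorpus_from_dictionary
-- ===== SOURCE A (Python) =====
-- def build_previous_wordcorpus_from_dictionary(dictionary, n_previous_words = 2):
--     assert(isinstance(dictionary, dict))
--
--     if 'indexed-corpus' not in dictionary:
--         raise ValueError('build_previous_wordcorpus_from_dictionary - indexed-tokens not defined in dictionary')
--
--     indexed_tokens = dictionary['indexed-corpus']
--     l = indexed_tokens.__len__()
--     v_data = []
--     for i_start in range(n_previous_words, l):
--         v_previous = [indexed_tokens[idx_j] for idx_j in range(i_start - n_previous_words, i_start)]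
--         v = indexed_tokens[i_start]
--         v_data.append((v, v_previous))
--
--     return v_data
-- ===== SOURCE B (Python) =====
-- def build_previous_wordcorpus_from_dictionary(dictionary, n_previous_words = 2):
--     # Single pass with an incrementally maintained sliding window of the
--     # previous n_previous_words tokens (no inner re-scan per position).
--     tokens = dictionary['indexed-corpus']
--     window = list(tokens[:n_previous_words])
--     v_data = []
--     for tok in tokens[n_previous_words:]:
--         v_data.append((tok, list(window)))
--         window.append(tok)
--         if len(window) > n_previous_words:
--             window.pop(0)
--     return v_data
-- ===== Notes on version B (the rewrite author's own statement) =====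
-- stated objective: alternative
-- what changed: Replaces the nested inner range-scan that rebuilds the previous-words list from scratch at every position with a single pass that incrementally maintains a sliding window (append new token, pop oldest), emitting a fresh copy per position.
-- outside the precondition, e.g. on build_previous_wordcorpus_from_dictionary({'indexed-corpus': [1, 2]}, -1): A returns [(2, []), (1, []), (2, [])], B returns [(2, [1])]
import Mathlib
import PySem

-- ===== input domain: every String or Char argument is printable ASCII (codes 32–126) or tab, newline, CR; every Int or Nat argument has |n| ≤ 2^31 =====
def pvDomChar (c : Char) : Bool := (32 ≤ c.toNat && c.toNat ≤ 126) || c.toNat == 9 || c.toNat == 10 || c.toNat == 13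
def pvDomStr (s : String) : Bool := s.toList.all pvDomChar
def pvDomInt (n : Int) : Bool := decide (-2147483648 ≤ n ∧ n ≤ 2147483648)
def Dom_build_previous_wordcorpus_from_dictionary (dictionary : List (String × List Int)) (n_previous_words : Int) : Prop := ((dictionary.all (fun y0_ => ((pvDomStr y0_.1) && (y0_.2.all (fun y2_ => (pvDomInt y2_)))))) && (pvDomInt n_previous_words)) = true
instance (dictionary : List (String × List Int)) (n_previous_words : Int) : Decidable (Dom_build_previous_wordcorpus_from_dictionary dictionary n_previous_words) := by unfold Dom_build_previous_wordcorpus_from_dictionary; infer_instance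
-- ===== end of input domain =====

-- B replaces A's nested inner range-scan by a single pass maintaining a sliding
-- window of the previous tokens incrementally (append / pop-front), copying it
-- once per emitted pair; equivalence is about the return value only.

-- ===== PORT A =====
def build_previous_wordcorpus_from_dictionary (dictionary : List (String × List Int)) (n_previous_words : Int) : List (Int × List Int) :=
  match dictionary.lookup "indexed-corpus" with
  | none => []           -- Python raises ValueError here; excluded by Pre_
  | some indexed_tokens =>
    let l : Int := indexed_tokens.length
    (PySem.List.pyRange n_previous_words l 1).foldl (fun v_data i_start =>
      let v_previous := (PySem.List.pyRange (i_start - n_previous_words) i_start 1).map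
        (fun idx_j => PySem.List.pyGetD indexed_tokens idx_j 0)
      let v := PySem.List.pyGetD indexed_tokens i_start 0
      v_data ++ [(v, v_previous)]) []

-- ===== PORT B =====
def build_previous_wordcorpus_from_dictionary_alt (dictionary : List (String × List Int)) (n_previous_words : Int) : List (Int × List Int) :=
  match dictionary.lookup "indexed-corpus" with
  | none => []           -- KeyError in B's Python; excluded by Pre_
  | some tokens =>
    let window := PySem.List.slice tokens none (some n_previous_words)   -- tokens[:n]
    let rest := PySem.List.slice tokens (some n_previous_words) none     -- tokens[n:]
    (rest.foldl (fun (st : List (Int × List Int) × List Int) tok =>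
        let v_data := st.1 ++ [(tok, st.2)]
        let w := st.2 ++ [tok]
        -- window.pop(0): w is nonempty here, so pop(0) is exactly drop 1
        let w' := if n_previous_words < (w.length : Int) then w.drop 1 else w
        (v_data, w')) ([], window)).1

-- ===== PRECONDITION & SPEC =====
-- Pre_ excludes dictionaries without the 'indexed-corpus' key (A raises ValueError,
-- B raises KeyError) and negative n_previous_words, which lie outside the natural
-- domain of a previous-word count: there A either raises IndexError (n < -len) or
-- returns wraparound pairs with empty context lists, an artefact of Python's
-- negative indexing, while B does the natural sliding-window thing.
def Pre_build_previous_wordcorpus_from_dictionary (dictionary : List (String × List Int)) (n_previous_words : Int) : Prop :=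
  (dictionary.lookup "indexed-corpus").isSome ∧ 0 ≤ n_previous_words
instance (dictionary : List (String × List Int)) (n_previous_words : Int) : Decidable (Pre_build_previous_wordcorpus_from_dictionary dictionary n_previous_words) := by unfold Pre_build_previous_wordcorpus_from_dictionary; infer_instance

def pvWitness_build_previous_wordcorpus_from_dictionary : (List (String × List Int)) × Int :=
  ([("indexed-corpus", [5, 7, 9, 11])], 2)

def Spec_build_previous_wordcorpus_from_dictionary (dictionary : List (String × List Int)) (n_previous_words : Int) (out : List (Int × List Int)) : Prop := out = build_previous_wordcorpus_from_dictionary_alt dictionary n_previous_words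
instance (dictionary : List (String × List Int)) (n_previous_words : Int) (out : List (Int × List Int)) : Decidable (Spec_build_previous_wordcorpus_from_dictionary dictionary n_previous_words out) := by unfold Spec_build_previous_wordcorpus_from_dictionary; infer_instance

-- ===== CLAIM (what is proved, stated in full; the proofs are below) =====
def Claim_equal_build_previous_wordcorpus_from_dictionary : Prop := ∀ (dictionary : List (String × List Int)) (n_previous_words : Int), Dom_build_previous_wordcorpus_from_dictionary dictionary n_previous_words → Pre_build_previous_wordcorpus_from_dictionary dictionary n_previous_words → Spec_build_previous_wordcorpus_from_dictionary dictionary n_previous_words (build_previous_wordcorpus_from_dictionary dictionary n_previous_words)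

-- ===== LEMMAS AND PROOFS =====

-- common closed form both ports are reduced to
def pvCommon (toks : List Int) (m : Nat) : List (Int × List Int) :=
  (List.range (toks.length - m)).map
    (fun k => (toks.getD (m + k) 0, (toks.drop k).take m))

theorem pvWindow_eq_map_range (toks : List Int) (m k : Nat) (h : m + k ≤ toks.length) :
    (toks.drop k).take m = (List.range m).map (fun j => toks.getD (k + j) 0) := by
  apply List.ext_getElem
  · simp; omega
  · intro i h1 h2
    have h3 : k + i < toks.length := by simp at h1; omega
    simp only [List.getElem_take, List.getElem_drop, List.getElem_map, List.getElem_range]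
    rw [List.getD_eq_getElem _ _ h3]

theorem pvA_eq_common (toks : List Int) (n : Int) (hn : 0 ≤ n) :
    (PySem.List.pyRange n toks.length 1).foldl (fun v_data i_start =>
      let v_previous := (PySem.List.pyRange (i_start - n) i_start 1).map
        (fun idx_j => PySem.List.pyGetD toks idx_j 0)
      let v := PySem.List.pyGetD toks i_start 0
      v_data ++ [(v, v_previous)]) [] = pvCommon toks n.toNat := by
  rw [PySem.List.foldl_append_singleton_eq_map, PySem.List.pyRange_one, List.map_map]
  have hl : ((toks.length : Int) - n).toNat = toks.length - n.toNat := by omega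
  rw [hl]
  unfold pvCommon
  refine List.ext_getElem (by simp) ?_
  intro k hk1 hk2
  simp only [List.nil_append, List.getElem_map, List.getElem_range, Function.comp_apply,
    Prod.mk.injEq]
  have hkl : n.toNat + k < toks.length := by
    simp at hk1; omega
  refine ⟨?_, ?_⟩
  · have h : n + (k : Int) = ((n.toNat + k : Nat) : Int) := by omega
    rw [h, PySem.List.pyGetD_natCast]
  · rw [pvWindow_eq_map_range toks n.toNat k (by omega), PySem.List.pyRange_one,
      List.map_map]
    have h1 : (n + (k : Int) - (n + (k : Int) - n)).toNat = n.toNat := by omega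
    rw [h1]
    refine List.map_congr_left ?_
    intro j hj
    simp only [Function.comp_apply]
    have h2 : n + (k : Int) - n + (j : Int) = ((k + j : Nat) : Int) := by push_cast; ring
    rw [h2, PySem.List.pyGetD_natCast]

-- B's fold invariant: processing tokens from position m+k with window tokens[k : k+m]
theorem pvB_invariant (toks : List Int) (m : Nat) (n : Int) (hn : n = (m : Int)) :
    ∀ (c k : Nat), c = toks.length - (m + k) →
    ∀ (acc : List (Int × List Int)),
    ((toks.drop (m + k)).foldl (fun (st : List (Int × List Int) × List Int) tok =>
        let v_data := st.1 ++ [(tok, st.2)]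
        let w := st.2 ++ [tok]
        let w' := if n < (w.length : Int) then w.drop 1 else w
        (v_data, w')) (acc, (toks.drop k).take m)).1
      = acc ++ (List.range (toks.length - (m + k))).map
          (fun i => (toks.getD (m + k + i) 0, (toks.drop (k + i)).take m)) := by
  intro c
  induction c with
  | zero =>
    intro k hc acc
    have h1 : toks.length ≤ m + k := by omega
    rw [List.drop_eq_nil_of_le h1]
    simp [Nat.sub_eq_zero_of_le h1]
  | succ c ih =>
    intro k hc acc
    have hlt : m + k < toks.length := by omega
    have hdrop : toks.drop (m + k) = toks[m + k] :: toks.drop (m + k + 1) := by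
      rw [List.drop_eq_getElem_cons hlt]
    rw [hdrop]
    simp only [List.foldl_cons]
    have hwinlen : ((toks.drop k).take m).length = m := by
      simp; omega
    have hcond : n < ((((toks.drop k).take m) ++ [toks[m + k]]).length : Int) := by
      simp [hwinlen, hn]
    rw [if_pos hcond]
    have hwin : (((toks.drop k).take m) ++ [toks[m + k]]).drop 1
        = (toks.drop (k + 1)).take m := by
      have hidx : (toks.drop k)[m]? = some toks[m + k] := by
        rw [List.getElem?_drop]
        have e : k + m = m + k := Nat.add_comm k m
        rw [e, List.getElem?_eq_getElem hlt]
      have h1 : ((toks.drop k).take m) ++ [toks[m + k]] = (toks.drop k).take (m + 1) := by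
        rw [List.take_add_one, hidx]
        rfl
      rw [h1, List.drop_take, List.drop_drop]
      have e1 : m + 1 - 1 = m := by omega
      simp only [e1]
    rw [hwin]
    have harg : m + (k + 1) = m + k + 1 := by omega
    have := ih (k + 1) (by omega) (acc ++ [(toks[m + k], (toks.drop k).take m)])
    rw [harg] at this
    rw [this]
    have hrange : toks.length - (m + k) = (toks.length - (m + k + 1)) + 1 := by omega
    rw [hrange, List.range_succ_eq_map]
    simp only [List.map_cons, List.map_map, List.append_assoc, List.cons_append,
      List.nil_append, Nat.add_zero]
    refine congrArg _ (List.cons_eq_cons.mpr ⟨?_, ?_⟩)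
    · rw [List.getD_eq_getElem _ _ hlt]
    · refine List.map_congr_left ?_
      intro i _
      simp only [Function.comp_apply, Nat.succ_eq_add_one, Prod.mk.injEq]
      have e1 : m + k + 1 + i = m + k + (i + 1) := by omega
      have e2 : k + 1 + i = k + (i + 1) := by omega
      rw [e1, e2]
      exact ⟨rfl, rfl⟩

theorem pvB_eq_common (toks : List Int) (n : Int) (hn : 0 ≤ n) :
    ((PySem.List.slice toks (some n) none).foldl (fun (st : List (Int × List Int) × List Int) tok =>
        let v_data := st.1 ++ [(tok, st.2)]
        let w := st.2 ++ [tok]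
        let w' := if n < (w.length : Int) then w.drop 1 else w
        (v_data, w')) ([], PySem.List.slice toks none (some n))).1 = pvCommon toks n.toNat := by
  rw [PySem.List.slice_from toks hn, PySem.List.slice_to toks hn]
  have h0 : toks.take n.toNat = (toks.drop 0).take n.toNat := by simp
  have h1 : toks.drop n.toNat = toks.drop (n.toNat + 0) := by simp
  rw [h0, h1]
  rw [pvB_invariant toks n.toNat n (by omega) (toks.length - (n.toNat + 0)) 0 rfl []]
  unfold pvCommon
  simp

-- ===== VERDICT (by name: the statement is the Claim_ definition above) =====
theorem build_previous_wordcorpus_from_dictionary_spec : Claim_equal_build_previous_wordcorpus_from_dictionary := by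
  intro dictionary n hdom hpre
  obtain ⟨hkey, hn⟩ := hpre
  unfold Spec_build_previous_wordcorpus_from_dictionary
  unfold build_previous_wordcorpus_from_dictionary build_previous_wordcorpus_from_dictionary_alt
  cases hlk : dictionary.lookup "indexed-corpus" with
  | none => simp [hlk] at hkey
  | some toks =>
    simp only
    rw [pvA_eq_common toks n hn, pvB_eq_common toks n hn]
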